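-- pv_equiv track=rewrite | github.com/realdacongjun/CTS_system | modules/transmission_optimizer.py | compute_rolling_hash
-- ===== SOURCE A (Python) =====
-- def compute_rolling_hash(data):
--     """
--     计算滚动哈希（简化版 Adler-32）
--
--     Args:
--         data: 字节数据
--
--     Returns:
--         hash_value: 哈希值
--     """
--     MOD_ADLER = 65521
--     a = 1
--     b = 0
--
--     for byte in data:
--         a = (a + byte) % MOD_ADLER
--         b = (b + a) % MOD_ADLER
--
--     return (b << 16) | a
-- ===== SOURCE B (Python) =====
-- def compute_rolling_hash(data):
--     """Closed-form simplified Adler-32: position-weighted sums instead of the rolling recurrence."""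
--     MOD_ADLER = 65521
--     xs = list(data)
--     n = len(xs)
--     a = (1 + sum(xs)) % MOD_ADLER
--     b = (n + sum((n - i) * x for i, x in enumerate(xs))) % MOD_ADLER
--     return (b << 16) | a
-- ===== Notes on version B (the rewrite author's own statement) =====
-- stated objective: alternative
-- what changed: Replaces the two-accumulator rolling recurrence (mod taken at every step) with two closed-form position-weighted sums reduced mod 65521 once: a = (1+sum) % M, b = (n + sum (n-i)*x_i) % M.
import Mathlib
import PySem

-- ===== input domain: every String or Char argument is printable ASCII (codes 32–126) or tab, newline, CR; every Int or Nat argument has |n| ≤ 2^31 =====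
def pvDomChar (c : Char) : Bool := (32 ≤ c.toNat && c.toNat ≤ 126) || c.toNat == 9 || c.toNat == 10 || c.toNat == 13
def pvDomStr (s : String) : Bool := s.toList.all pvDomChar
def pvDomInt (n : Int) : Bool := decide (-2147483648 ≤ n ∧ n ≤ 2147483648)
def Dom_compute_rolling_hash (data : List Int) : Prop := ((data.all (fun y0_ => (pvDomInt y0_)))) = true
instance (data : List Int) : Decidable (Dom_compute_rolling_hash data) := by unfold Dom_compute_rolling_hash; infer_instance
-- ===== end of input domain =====

-- B replaces A's two-accumulator rolling recurrence by closed-form position-weighted sums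
-- reduced mod 65521 once each (alternative decomposition, same O(n) cost).


-- ===== PORT A =====
-- loop body of A: a = (a + byte) % 65521; b = (b + a) % 65521
def pvStepA (ab : Int × Int) (byte : Int) : Int × Int :=
  let a := PySem.Int.mod (ab.1 + byte) 65521
  (a, PySem.Int.mod (ab.2 + a) 65521)

def compute_rolling_hash (data : List Int) : Int :=
  let r := data.foldl pvStepA (1, 0)
  PySem.Int.bor (r.2 <<< (16 : Nat)) r.1

-- ===== PORT B =====
def compute_rolling_hash_alt (data : List Int) : Int :=
  let n : Int := data.length
  let a := PySem.Int.mod (1 + data.sum) 65521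
  let b := PySem.Int.mod
    (n + ((PySem.List.enumerate data 0).map (fun p => (n - p.1) * p.2)).sum) 65521
  PySem.Int.bor (b <<< (16 : Nat)) a

-- ===== PRECONDITION & SPEC =====
def Spec_compute_rolling_hash (data : List Int) (out : Int) : Prop := out = compute_rolling_hash_alt data
instance (data : List Int) (out : Int) : Decidable (Spec_compute_rolling_hash data out) := by unfold Spec_compute_rolling_hash; infer_instance

-- ===== CLAIM (what is proved, stated in full; the proofs are below) =====
def Claim_equal_compute_rolling_hash : Prop := ∀ (data : List Int), Dom_compute_rolling_hash data → Spec_compute_rolling_hash data (compute_rolling_hash data)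

-- ===== LEMMAS AND PROOFS =====

-- bumping the weight offset by one adds one copy of the plain sum
lemma pv_wsum_succ (c : Int) (xs : List Int) : ∀ s : Int,
    ((PySem.List.enumerate xs s).map (fun p => ((c + 1) - p.1) * p.2)).sum
      = ((PySem.List.enumerate xs s).map (fun p => (c - p.1) * p.2)).sum + xs.sum := by
  induction xs with
  | nil => intro s; simp [PySem.List.enumerate_nil]
  | cons x t ih =>
      intro s
      simp only [PySem.List.enumerate_cons, List.map_cons, List.sum_cons, ih (s + 1)]
      ring

-- A's fold in closed form
lemma pv_fold_closed (xs : List Int) :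
    xs.foldl pvStepA (1, 0)
      = (PySem.Int.mod (1 + xs.sum) 65521,
         PySem.Int.mod ((xs.length : Int)
           + ((PySem.List.enumerate xs 0).map
               (fun p => ((xs.length : Int) - p.1) * p.2)).sum) 65521) := by
  induction xs using List.reverseRecOn with
  | nil => decide
  | append_singleton t x ih =>
      rw [List.foldl_append, ih]
      simp only [List.foldl_cons, List.foldl_nil, pvStepA, PySem.List.enumerate_append,
        PySem.List.enumerate_cons, PySem.List.enumerate_nil, List.map_append, List.map_cons,
        List.map_nil, List.sum_append, List.sum_cons, List.sum_nil, List.length_append,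
        List.length_cons, List.length_nil, List.sum_append]
      push_cast
      have hsucc := pv_wsum_succ (t.length : Int) t 0
      rw [show ((t.length : Int) + 1) - ((0 : Int) + (t.length : Int)) = 1 by ring]
      rw [show (fun p : Int × Int => ((t.length : Int) + 1 - p.1) * p.2)
            = (fun p : Int × Int => (((t.length : Int)) + 1 - p.1) * p.2) from rfl, hsucc]
      rw [PySem.Int.mod_eq_emod_of_pos (by norm_num), PySem.Int.mod_eq_emod_of_pos (by norm_num),
          PySem.Int.mod_eq_emod_of_pos (by norm_num), PySem.Int.mod_eq_emod_of_pos (by norm_num),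
          PySem.Int.mod_eq_emod_of_pos (by norm_num), PySem.Int.mod_eq_emod_of_pos (by norm_num)]
      rw [Prod.mk.injEq]
      constructor <;> omega

-- ===== VERDICT (by name: the statement is the Claim_ definition above) =====
theorem compute_rolling_hash_spec : Claim_equal_compute_rolling_hash := by
  intro data _
  unfold Spec_compute_rolling_hash compute_rolling_hash compute_rolling_hash_alt
  rw [pv_fold_closed]
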